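-- pv_equiv track=rewrite | github.com/ABrasburg/TDA-respuestas | Greedy/Ej1.py | patrullas
-- ===== SOURCE A (Python) =====
-- def patrullas(cities):
--     patrullas = []
--     while len(cities) > 0:
--         max = 0
--         max_city = ""
--         for city in cities:
--             count = 0
--             for c in cities:
--                 if abs(c - city) < 50:
--                     count += 1
--             if count > max:
--                 max = count
--                 max_city = city
--         patrullas.append(max_city)
--         cities = [c for c in cities if abs(c - max_city) >= 50]
--     return patrullas
-- ===== SOURCE B (Python) =====
-- def patrullas(cities):
--     result = []
--     remaining = cities
--     while remaining:
--         # counts via a sorted copy and a sliding two-pointer window: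
--         # for value v, its count is #{c : v - 50 < c < v + 50}
--         s = sorted(remaining)
--         n = len(s)
--         cnt = {}
--         lo = 0
--         hi = 0
--         for v in s:
--             while lo < n and s[lo] <= v - 50:
--                 lo += 1
--             while hi < n and s[hi] < v + 50:
--                 hi += 1
--             cnt[v] = hi - lo
--         best = remaining[0]
--         for x in remaining[1:]:
--             if cnt[x] > cnt[best]:
--                 best = x
--         result.append(best)
--         remaining = [c for c in remaining if abs(c - best) >= 50]
--     return result
-- ===== Notes on version B (the rewrite author's own statement) =====
-- stated objective: faster
-- what changed: Each greedy round now sorts the remaining cities once and computes every city's within-50 neighbour count with a single sliding two-pointer sweep stored in a dict, replacing A's quadratic nested counting loops; the first-maximal tie-break is kept by scanning in original order.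
import Mathlib
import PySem

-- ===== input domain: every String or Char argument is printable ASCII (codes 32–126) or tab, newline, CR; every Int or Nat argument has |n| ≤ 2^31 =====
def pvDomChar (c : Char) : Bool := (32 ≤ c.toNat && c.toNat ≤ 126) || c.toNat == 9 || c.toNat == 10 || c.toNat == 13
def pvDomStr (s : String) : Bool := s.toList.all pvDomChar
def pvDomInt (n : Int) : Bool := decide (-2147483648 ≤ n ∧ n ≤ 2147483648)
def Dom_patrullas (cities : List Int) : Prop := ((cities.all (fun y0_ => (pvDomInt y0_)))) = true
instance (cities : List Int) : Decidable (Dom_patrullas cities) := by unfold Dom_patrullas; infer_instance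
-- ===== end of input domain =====

-- B replaces A's per-round quadratic neighbour counting by one sort plus a sliding
-- two-pointer sweep (counts kept in a dict), keeping the first-maximal tie-break.

-- ===== PORT A =====
-- inner 'for c in cities' counting loop
def patrullasCount (cities : List Int) (city : Int) : Int :=
  cities.foldl (fun count c => if |c - city| < 50 then count + 1 else count) 0

-- 'for city in cities' selection loop, state (max, max_city); max_city = none is the initial ""
def patrullasSelA (cities : List Int) : Int × Option Int :=
  cities.foldl
    (fun st city =>
      let count := patrullasCount cities city
      if count > st.1 then (count, some city) else st)
    ((0 : Int), (none : Option Int))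

-- the while loop; fuel = initial length bounds the number of rounds (each round removes ≥ 1 city)
def patrullasGoA : Nat → List Int → List Int → List Int
  | 0, _, acc => acc
  | fuel + 1, cities, acc =>
    if cities.isEmpty then acc
    else
      match (patrullasSelA cities).2 with
      | none => acc  -- unreachable totality guard: on a nonempty list some count > 0
      | some city =>
          patrullasGoA fuel (cities.filter (fun c => decide (50 ≤ |c - city|))) (acc ++ [city])

def patrullas (cities : List Int) : List Int :=
  patrullasGoA cities.length cities []

-- ===== PORT B =====
-- 'while lo < n and p(s[lo]): lo += 1' pointer-advance loop (p is the window bound test)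
def patrullasAdv (s : List Int) (p : Int → Bool) (lo : Nat) : Nat :=
  if h : lo < s.length ∧ p (s.getD lo 0) then patrullasAdv s p (lo + 1) else lo
termination_by s.length - lo
decreasing_by omega

-- body of 'for v in s' building cnt with the two pointers
def patrullasStep (s : List Int) (st : Nat × Nat × PySem.Dict Int Int) (v : Int) :
    Nat × Nat × PySem.Dict Int Int :=
  let lo := patrullasAdv s (fun c => decide (c ≤ v - 50)) st.1
  let hi := patrullasAdv s (fun c => decide (c < v + 50)) st.2.1
  (lo, hi, st.2.2.insert v ((hi : Int) - (lo : Int)))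

def patrullasScan (s : List Int) : PySem.Dict Int Int :=
  (s.foldl (patrullasStep s) (0, 0, PySem.Dict.empty)).2.2

def patrullasGoB : Nat → List Int → List Int → List Int
  | 0, _, acc => acc
  | fuel + 1, remaining, acc =>
    match remaining with
    | [] => acc
    | r0 :: rest =>
        let cnt := patrullasScan (PySem.List.sorted (r0 :: rest) (fun x => x) false)
        let best := rest.foldl (fun b x => if cnt.getD x 0 > cnt.getD b 0 then x else b) r0
        patrullasGoB fuel ((r0 :: rest).filter (fun c => decide (50 ≤ |c - best|))) (acc ++ [best])

def patrullas_alt (cities : List Int) : List Int :=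
  patrullasGoB cities.length cities []

-- ===== PRECONDITION & SPEC =====
def Spec_patrullas (cities : List Int) (out : List Int) : Prop := out = patrullas_alt cities
instance (cities : List Int) (out : List Int) : Decidable (Spec_patrullas cities out) := by unfold Spec_patrullas; infer_instance

-- ===== CLAIM (what is proved, stated in full; the proofs are below) =====
def Claim_equal_patrullas : Prop := ∀ (cities : List Int), Dom_patrullas cities → Spec_patrullas cities (patrullas cities)

-- ===== LEMMAS AND PROOFS =====

-- the exact neighbour count B's dict must reproduce, as a bracket difference over s
def pvC (s : List Int) (v : Int) : Int :=
  (s.countP (fun c => decide (c < v + 50)) : Int) - (s.countP (fun c => decide (c ≤ v - 50)) : Int)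

-- on a sorted list a downward-closed test holds exactly on the first countP positions
lemma pv_sorted_countP_getElem {s : List Int} {p : Int → Bool}
    (hdc : ∀ a b : Int, a ≤ b → p b = true → p a = true)
    (hs : s.Pairwise (· ≤ ·)) (i : Nat) (hi : i < s.length) :
    p s[i] = true ↔ i < s.countP p := by
  rw [List.pairwise_iff_getElem] at hs
  constructor
  · intro hp
    have hall : ∀ a ∈ s.take (i+1), p a = true := by
      intro a ha
      obtain ⟨j, hj, hja⟩ := List.mem_iff_getElem.mp ha
      have hjlen : j < i + 1 := by
        have := hj; simp [List.length_take] at this; omega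
      rw [List.getElem_take] at hja
      subst hja
      rcases Nat.lt_or_ge j i with hji | hji
      · exact hdc _ _ (hs j i (by omega) hi hji) hp
      · have hji' : j = i := by omega
        subst hji'; exact hp
    have h1 : (s.take (i+1)).countP p = i + 1 := by
      rw [List.countP_eq_length.mpr hall, List.length_take]
      omega
    have h2 : s.countP p = (s.take (i+1)).countP p + (s.drop (i+1)).countP p := by
      rw [← List.countP_append, List.take_append_drop]
    omega
  · intro ht
    by_contra hp
    have hall : ∀ a ∈ s.drop i, ¬ p a = true := by
      intro a ha
      obtain ⟨j, hj, hja⟩ := List.mem_iff_getElem.mp ha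
      rw [List.getElem_drop] at hja
      subst hja
      intro hpj
      rcases Nat.eq_zero_or_pos j with h0 | h0
      · subst h0; simp at hpj; exact hp hpj
      · exact hp (hdc _ _ (hs i (i+j) hi (by
          have := hj; simp [List.length_drop] at this; omega) (by omega)) hpj)
    have h0 : (s.drop i).countP p = 0 := List.countP_eq_zero.mpr hall
    have h2 : s.countP p = (s.take i).countP p + (s.drop i).countP p := by
      rw [← List.countP_append, List.take_append_drop]
    have h3 : (s.take i).countP p ≤ (s.take i).length := List.countP_le_length
    have h4 : (s.take i).length ≤ i := by simp [List.length_take]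
    omega

-- the pointer-advance loop lands exactly on countP, from any start not past it
lemma pv_adv_eq {s : List Int} {p : Int → Bool}
    (hdc : ∀ a b : Int, a ≤ b → p b = true → p a = true)
    (hs : s.Pairwise (· ≤ ·)) (lo : Nat) (hlo : lo ≤ s.countP p) :
    patrullasAdv s p lo = s.countP p := by
  have ht : s.countP p ≤ s.length := List.countP_le_length
  rw [patrullasAdv]
  rcases Nat.lt_or_ge lo (s.countP p) with hlt | hge
  · have hlen : lo < s.length := by omega
    have hp' : p (s.getD lo 0) = true := by
      rw [List.getD_eq_getElem s 0 hlen]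
      exact (pv_sorted_countP_getElem hdc hs lo hlen).mpr hlt
    rw [dif_pos ⟨hlen, hp'⟩]
    exact pv_adv_eq hdc hs (lo+1) hlt
  · have heq : lo = s.countP p := by omega
    rw [dif_neg]
    · exact heq
    · rintro ⟨hlen, hp'⟩
      rw [List.getD_eq_getElem s 0 hlen] at hp'
      have := (pv_sorted_countP_getElem hdc hs lo hlen).mp hp'
      omega
termination_by s.countP p - lo
decreasing_by omega

lemma pv_scan_aux (s : List Int) (hs : s.Pairwise (· ≤ ·)) :
    ∀ (suf : List Int), suf.Pairwise (· ≤ ·) →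
    ∀ (lo hi : Nat) (d : PySem.Dict Int Int),
      (∀ v ∈ suf, lo ≤ s.countP (fun c => decide (c ≤ v - 50)) ∧
                  hi ≤ s.countP (fun c => decide (c < v + 50))) →
      (∀ w, d.contains w = true → d.getD w 0 = pvC s w) →
      ∀ w, (w ∈ suf ∨ d.contains w = true) →
        ((suf.foldl (patrullasStep s) (lo, hi, d)).2.2).getD w 0 = pvC s w := by
  intro suf
  induction suf with
  | nil =>
    intro _ lo hi d _ hd w hw
    simp only [List.foldl_nil]
    exact hd w (hw.resolve_left (by simp))
  | cons v suf' ih =>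
    intro hp lo hi d hb hd w hw
    obtain ⟨hvle, hp'⟩ := List.pairwise_cons.mp hp
    have hbv := hb v (List.mem_cons_self)
    have hlo' : patrullasAdv s (fun c => decide (c ≤ v - 50)) lo
        = s.countP (fun c => decide (c ≤ v - 50)) :=
      pv_adv_eq (by intro a b hab hbp; simp at *; omega) hs lo hbv.1
    have hhi' : patrullasAdv s (fun c => decide (c < v + 50)) hi
        = s.countP (fun c => decide (c < v + 50)) :=
      pv_adv_eq (by intro a b hab hbp; simp at *; omega) hs hi hbv.2
    simp only [List.foldl_cons]
    have hstep : patrullasStep s (lo, hi, d) v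
        = (s.countP (fun c => decide (c ≤ v - 50)), s.countP (fun c => decide (c < v + 50)),
           d.insert v (pvC s v)) := by
      simp only [patrullasStep, hlo', hhi']
      rfl
    rw [hstep]
    apply ih hp'
    · intro x hx
      have hvx : v ≤ x := hvle x hx
      constructor
      · exact List.countP_mono_left (by intro a _ ha; simp at *; omega)
      · exact List.countP_mono_left (by intro a _ ha; simp at *; omega)
    · intro w' hw'
      by_cases hwv : w' = v
      · subst hwv
        rw [PySem.Dict.getD_insert, if_pos rfl]
      · rw [PySem.Dict.getD_insert, if_neg hwv]
        apply hd
        rw [PySem.Dict.contains_insert] at hw'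
        simpa [hwv] using hw'
    · rcases hw with hw | hw
      · rcases List.mem_cons.mp hw with h | h
        · subst h
          right
          exact PySem.Dict.contains_insert_self _ _ _
        · left; exact h
      · right
        rw [PySem.Dict.contains_insert]
        simp [hw]

lemma pv_scan_getD {s : List Int} (hs : s.Pairwise (· ≤ ·)) (v : Int) (hv : v ∈ s) :
    (patrullasScan s).getD v 0 = pvC s v := by
  unfold patrullasScan
  exact pv_scan_aux s hs s hs 0 0 PySem.Dict.empty
    (fun x _ => ⟨Nat.zero_le _, Nat.zero_le _⟩)
    (fun w hw => by simp [PySem.Dict.contains_empty] at hw)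
    v (Or.inl hv)

lemma pv_countP_split (s : List Int) (v : Int) :
    s.countP (fun c => decide (c < v + 50))
      = s.countP (fun c => decide (c ≤ v - 50)) + s.countP (fun c => decide (|c - v| < 50)) := by
  induction s with
  | nil => rfl
  | cons c t ih =>
    simp only [List.countP_cons, ih, abs_lt, decide_eq_true_eq]
    split_ifs <;> omega

-- the bracket difference is the window count
lemma pv_C_eq_window (s : List Int) (v : Int) :
    pvC s v = (s.countP (fun c => decide (|c - v| < 50)) : Int) := by
  unfold pvC
  rw [pv_countP_split]
  push_cast
  ring

-- A's inner loop is the window count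
lemma pv_countA_eq (r : List Int) (v : Int) :
    patrullasCount r v = (r.countP (fun c => decide (|c - v| < 50)) : Int) := by
  unfold patrullasCount
  have h := PySem.List.foldl_if_add_one (fun c => decide (|c - v| < 50)) r (0 : Int)
  simpa using h

-- the two argmax folds agree when the scores agree
lemma pv_sel_aux (f g : Int → Int) :
    ∀ (l : List Int) (b : Int), (∀ x ∈ l, g x = f x) → g b = f b →
      l.foldl (fun st x =>
          let count := f x
          if count > st.1 then (count, some x) else st) (f b, some b)
        = (f (l.foldl (fun bb x => if g x > g bb then x else bb) b),
           some (l.foldl (fun bb x => if g x > g bb then x else bb) b)) := by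
  intro l
  induction l with
  | nil => intro b _ _; simp
  | cons x t ih =>
    intro b hl hb
    have hx : g x = f x := hl x (List.mem_cons_self)
    simp only [List.foldl_cons]
    by_cases h : f x > f b
    · rw [if_pos h, if_pos (by rw [hx, hb]; exact h)]
      exact ih x (fun y hy => hl y (List.mem_cons_of_mem _ hy)) hx
    · rw [if_neg h, if_neg (by rw [hx, hb]; exact h)]
      exact ih b (fun y hy => hl y (List.mem_cons_of_mem _ hy)) hb

lemma pv_round (r0 : Int) (rest : List Int) :
    patrullasSelA (r0 :: rest)
      = (patrullasCount (r0 :: rest)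
           (rest.foldl
             (fun b x =>
               if (patrullasScan (PySem.List.sorted (r0 :: rest) (fun x => x) false)).getD x 0 >
                  (patrullasScan (PySem.List.sorted (r0 :: rest) (fun x => x) false)).getD b 0
               then x else b) r0),
         some (rest.foldl
             (fun b x =>
               if (patrullasScan (PySem.List.sorted (r0 :: rest) (fun x => x) false)).getD x 0 >
                  (patrullasScan (PySem.List.sorted (r0 :: rest) (fun x => x) false)).getD b 0
               then x else b) r0)) := by
  have hperm : (PySem.List.sorted (r0 :: rest) (fun x => x) false).Perm (r0 :: rest) :=
    PySem.List.sorted_perm _ _ _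
  have hs : (PySem.List.sorted (r0 :: rest) (fun x => x) false).Pairwise (· ≤ ·) := by
    have h := PySem.List.sorted_pairwise (xs := r0 :: rest) (key := fun x => x)
    simpa using h
  have hg : ∀ x ∈ (r0 :: rest),
      (patrullasScan (PySem.List.sorted (r0 :: rest) (fun x => x) false)).getD x 0
        = patrullasCount (r0 :: rest) x := by
    intro x hx
    rw [pv_scan_getD hs x (hperm.mem_iff.mpr hx), pv_C_eq_window, hperm.countP_eq, pv_countA_eq]
  have hpos : patrullasCount (r0 :: rest) r0 > 0 := by
    rw [pv_countA_eq]
    have h : 0 < (r0 :: rest).countP (fun c => decide (|c - r0| < 50)) :=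
      List.countP_pos_iff.mpr ⟨r0, List.mem_cons_self, by simp⟩
    exact_mod_cast h
  unfold patrullasSelA
  rw [List.foldl_cons]
  rw [if_pos hpos]
  exact pv_sel_aux (patrullasCount (r0 :: rest))
    (fun y => (patrullasScan (PySem.List.sorted (r0 :: rest) (fun x => x) false)).getD y 0)
    rest r0 (fun x hx => hg x (List.mem_cons_of_mem _ hx)) (hg r0 (List.mem_cons_self))

lemma pv_go_eq : ∀ (fuel : Nat) (r acc : List Int),
    patrullasGoA fuel r acc = patrullasGoB fuel r acc := by
  intro fuel
  induction fuel with
  | zero => intro r acc; rfl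
  | succ n ih =>
    intro r acc
    cases r with
    | nil => rfl
    | cons r0 rest =>
      rw [patrullasGoA, patrullasGoB]
      rw [pv_round]
      simp only [List.isEmpty_cons, Bool.false_eq_true, if_false]
      exact ih _ _

-- ===== VERDICT (by name: the statement is the Claim_ definition above) =====
theorem patrullas_spec : Claim_equal_patrullas := by
  intro cities _
  unfold Spec_patrullas patrullas patrullas_alt
  exact pv_go_eq _ _ _
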